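-- pv_equiv track=rewrite | github.com/Snowy02/AAD_Subproblem_Solvers | src/algorithms/levenshtein.py | count_comparisons_levenshtein
-- ===== SOURCE A (Python) =====
-- def count_comparisons_levenshtein(text: str, pattern: str, max_distance: int):
--
--     n, m = len(text), len(pattern)
--     comparisons = 0
--
--     if m == 0:
--         return list(range(n + 1)), 0
--     if n < m:
--         return [], 0
--
--     matches = []
--
--     for start in range(n - m + 1):
--         prev = list(range(m + 1))
--         curr = [0] * (m + 1)
--
--         for i in range(1, m + 1):
--             curr[0] = i
--             for j in range(1, m + 1):
--                 comparisons += 1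
--                 cost = 0 if text[start + i - 1] == pattern[j - 1] else 1
--                 curr[j] = min(
--                     prev[j] + 1,
--                     curr[j - 1] + 1,
--                     prev[j - 1] + cost
--                 )
--             prev, curr = curr, prev
--
--         if prev[m] <= max_distance:
--             matches.append(start)
--
--     return matches, comparisons
-- ===== SOURCE B (Python) =====
-- def count_comparisons_levenshtein(text: str, pattern: str, max_distance: int):
--     n, m = len(text), len(pattern)
--     if m == 0:
--         return list(range(n + 1)), 0
--     if n < m:
--         return [], 0
--     matches = []
--     for start in range(n - m + 1):
--         # anti-diagonal wavefront: fill the DP matrix diagonal by diagonal into one table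
--         cell = {}
--         get = lambda i, j: j if i == 0 else (i if j == 0 else cell[(i, j)])
--         for s in range(2, 2 * m + 1):
--             for i in range(max(1, s - m), min(m, s - 1) + 1):
--                 j = s - i
--                 cost = 0 if text[start + i - 1] == pattern[j - 1] else 1
--                 cell[(i, j)] = min(get(i - 1, j) + 1, get(i, j - 1) + 1,
--                                    get(i - 1, j - 1) + cost)
--         if cell[(m, m)] <= max_distance:
--             matches.append(start)
--     return matches, (n - m + 1) * m * m
-- ===== Notes on version B (the rewrite author's own statement) =====
-- stated objective: alternative
-- what changed: B fills each window's edit-distance matrix by anti-diagonal wavefronts into a single dict keyed by (i,j) (border cells computed on the fly), instead of A's row-by-row sweep over two reusable arrays, and computes the comparison counter in closed form (n-m+1)*m*m.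
import Mathlib
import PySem

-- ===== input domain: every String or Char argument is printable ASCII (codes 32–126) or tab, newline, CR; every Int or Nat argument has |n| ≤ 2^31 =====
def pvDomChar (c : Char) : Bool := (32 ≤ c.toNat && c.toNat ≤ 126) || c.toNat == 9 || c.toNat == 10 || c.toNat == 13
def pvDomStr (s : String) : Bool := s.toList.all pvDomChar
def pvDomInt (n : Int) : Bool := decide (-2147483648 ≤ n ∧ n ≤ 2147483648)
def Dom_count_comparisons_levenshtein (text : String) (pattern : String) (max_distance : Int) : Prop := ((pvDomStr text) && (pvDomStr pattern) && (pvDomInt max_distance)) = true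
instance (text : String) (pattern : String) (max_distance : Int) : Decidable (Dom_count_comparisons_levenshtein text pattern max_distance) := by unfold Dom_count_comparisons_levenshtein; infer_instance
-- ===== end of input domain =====

-- B fills each window's DP matrix by anti-diagonal wavefronts into one dict instead of A's
-- row-by-row two-array sweep, and computes the comparison counter in closed form; same results.


-- ===== PORT A =====
-- the innermost j-loop body (comparisons counter, curr row); prev is the captured previous row
def pvAInner (text pattern : String) (start i : Int) (prev : List Int) (t : Int × List Int) (j : Int) : Int × List Int :=
  let comparisons := t.1 + 1
  -- indices are in range on every executed iteration; pyGet? options compare exactly like Python's chars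
  let cost : Int := if PySem.Str.pyGet? text (start + i - 1) = PySem.Str.pyGet? pattern (j - 1) then 0 else 1
  (comparisons, PySem.List.pySetD t.2 j
      (min (min (PySem.List.pyGetD prev j 0 + 1) (PySem.List.pyGetD t.2 (j - 1) 0 + 1))
           (PySem.List.pyGetD prev (j - 1) 0 + cost)))

-- the i-loop body: curr[0] = i, run the j-loop, then swap prev and curr
def pvAMid (text pattern : String) (start : Int) (s : Int × List Int × List Int) (i : Int) : Int × List Int × List Int :=
  let m : Int := PySem.Str.len pattern
  let t3 := (PySem.List.pyRange 1 (m + 1) 1).foldl (pvAInner text pattern start i s.2.1) (s.1, PySem.List.pySetD s.2.2 0 i)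
  (t3.1, t3.2, s.2.1)

-- the start-loop body: fresh prev/curr, run the i-loop, record the window on a small final distance
def pvAOuter (text pattern : String) (max_distance : Int) (st : Int × List Int) (start : Int) : Int × List Int :=
  let m : Int := PySem.Str.len pattern
  let prev := PySem.List.pyRange 0 (m + 1) 1
  let curr := PySem.List.pyRepeat [(0 : Int)] (m + 1)
  let s3 := (PySem.List.pyRange 1 (m + 1) 1).foldl (pvAMid text pattern start) (st.1, prev, curr)
  (s3.1, if PySem.List.pyGetD s3.2.1 m 0 ≤ max_distance then st.2 ++ [start] else st.2)

def count_comparisons_levenshtein (text : String) (pattern : String) (max_distance : Int) : List Int × Int :=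
  let n : Int := PySem.Str.len text
  let m : Int := PySem.Str.len pattern
  if m = 0 then (PySem.List.pyRange 0 (n + 1) 1, 0)
  else if n < m then ([], 0)
  else
    let res := (PySem.List.pyRange 0 (n - m + 1) 1).foldl (pvAOuter text pattern max_distance) (0, [])
    (res.2, res.1)

-- ===== PORT B =====
-- B's `get` lambda: border cells are computed, interior cells read from the dict
-- (the dict read is always a hit: interior cells read here lie on an earlier anti-diagonal)
def pvBGet (cell : PySem.Dict (Int × Int) Int) (i j : Int) : Int :=
  if i = 0 then j else if j = 0 then i else (PySem.Dict.get? cell (i, j)).getD 0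

-- body of the inner loop over the cells (i, s-i) of anti-diagonal s
def pvBInner (text pattern : String) (start s : Int) (cell : PySem.Dict (Int × Int) Int) (i : Int) : PySem.Dict (Int × Int) Int :=
  let j := s - i
  let cost : Int := if PySem.Str.pyGet? text (start + i - 1) = PySem.Str.pyGet? pattern (j - 1) then 0 else 1
  PySem.Dict.insert cell (i, j)
    (min (min (pvBGet cell (i - 1) j + 1) (pvBGet cell i (j - 1) + 1)) (pvBGet cell (i - 1) (j - 1) + cost))

-- one window: sweep anti-diagonals s = 2 .. 2m, then test cell[(m, m)] (always present: m ≥ 1 here)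
def pvBWindow (text pattern : String) (max_distance : Int) (ms : List Int) (start : Int) : List Int :=
  let m : Int := PySem.Str.len pattern
  let cell := (PySem.List.pyRange 2 (2 * m + 1) 1).foldl
    (fun c s => (PySem.List.pyRange (max 1 (s - m)) (min m (s - 1) + 1) 1).foldl (pvBInner text pattern start s) c)
    PySem.Dict.empty
  if (PySem.Dict.get? cell (m, m)).getD 0 ≤ max_distance then ms ++ [start] else ms

def count_comparisons_levenshtein_alt (text : String) (pattern : String) (max_distance : Int) : List Int × Int :=
  let n : Int := PySem.Str.len text
  let m : Int := PySem.Str.len pattern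
  if m = 0 then (PySem.List.pyRange 0 (n + 1) 1, 0)
  else if n < m then ([], 0)
  else
    let matchs := (PySem.List.pyRange 0 (n - m + 1) 1).foldl (pvBWindow text pattern max_distance) []
    (matchs, (n - m + 1) * m * m)

-- ===== PRECONDITION & SPEC =====
def Spec_count_comparisons_levenshtein (text : String) (pattern : String) (max_distance : Int) (out : List Int × Int) : Prop := out = count_comparisons_levenshtein_alt text pattern max_distance
instance (text : String) (pattern : String) (max_distance : Int) (out : List Int × Int) : Decidable (Spec_count_comparisons_levenshtein text pattern max_distance out) := by unfold Spec_count_comparisons_levenshtein; infer_instance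

-- ===== CLAIM (what is proved, stated in full; the proofs are below) =====
def Claim_equal_count_comparisons_levenshtein : Prop := ∀ (text : String) (pattern : String) (max_distance : Int), Dom_count_comparisons_levenshtein text pattern max_distance → Spec_count_comparisons_levenshtein text pattern max_distance (count_comparisons_levenshtein text pattern max_distance)

-- ===== LEMMAS AND PROOFS =====

-- the common specification: pvD i j = edit distance of the window's first i chars vs pattern's first j
def pvD (text pattern : String) (start : Int) : Nat → Nat → Int
  | 0, j => (j : Int)
  | i + 1, 0 => (i : Int) + 1
  | i + 1, j + 1 =>
    let cost : Int := if PySem.Str.pyGet? text (start + (i : Int)) = PySem.Str.pyGet? pattern (j : Int) then 0 else 1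
    min (min (pvD text pattern start i (j + 1) + 1) (pvD text pattern start (i + 1) j + 1))
        (pvD text pattern start i j + cost)

-- ---- A-side machinery: A's row loop in normal form ----

-- the cell value of one DP step, first in branchy form, then as a min
def pvVal (c p : Char) (a left b : Int) : Int :=
  min (min (b + 1) (left + 1)) (a + (if c = p then 0 else 1))

def nextRowAux (pl : List Char) (pt : List Int) (a left : Int) (c : Char) : List Int :=
  match pl, pt with
  | p :: ps, b :: bs => pvVal c p a left b :: nextRowAux ps bs b (pvVal c p a left b) c
  | _, _ => []

def nextRow (prev : List Int) (pl : List Char) (c : Char) : List Int :=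
  match prev with
  | [] => []   -- never hit: prev always has length m+1 ≥ 1
  | a :: pt => (a + 1) :: nextRowAux pl pt a (a + 1) c

-- the DP row after t characters of the window at `start` (the normal form of A's i-loop state)
def pvRow (text pattern : String) (start : Int) : Nat → List Int
  | 0 => PySem.List.pyRange 0 ((pattern.toList.length : Int) + 1) 1
  | t + 1 => nextRow (pvRow text pattern start t) pattern.toList
      ((PySem.Str.pyGet? text (start + (t : Int))).getD ' ')

theorem nextRowAux_cons (p : Char) (ps : List Char) (b : Int) (bs : List Int) (a left : Int) (c : Char) :
    nextRowAux (p :: ps) (b :: bs) a left c = pvVal c p a left b :: nextRowAux ps bs b (pvVal c p a left b) c := rfl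

theorem str_pyGet_natCast (s : String) (t : Nat) (h : t < s.toList.length) :
    PySem.Str.pyGet? s (t : Int) = some (s.toList.getD t ' ') := by
  simp [pysem, List.getD_eq_getElem?_getD]
  rw [List.getElem?_eq_getElem h]
  simp

theorem set_append_len (l1 l2 : List Int) (n : Nat) (v : Int) (h : n = l1.length) :
    (l1 ++ l2).set n v = l1 ++ l2.set 0 v := by
  subst h
  induction l1 with
  | nil => rfl
  | cons x xs ih => simp [ih]

theorem nextRowAux_length (pl : List Char) (pt : List Int) (a left : Int) (c : Char)
    (h : pt.length = pl.length) : (nextRowAux pl pt a left c).length = pl.length := by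
  induction pl generalizing pt a left with
  | nil => simp [nextRowAux]
  | cons p ps ih =>
    cases pt with
    | nil => simp at h
    | cons b bs =>
      rw [nextRowAux_cons]
      simpa using ih bs b (pvVal c p a left b) (by simpa using h)

theorem nextRowAux_getD (pl : List Char) (pt : List Int) (a left : Int) (c : Char) (k : Nat)
    (h : pt.length = pl.length) (hk : k < pl.length) :
    (nextRowAux pl pt a left c).getD k 0 =
      pvVal c (pl.getD k ' ') ((a :: pt).getD k 0) ((left :: nextRowAux pl pt a left c).getD k 0) (pt.getD k 0) := by
  induction pl generalizing pt a left k with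
  | nil => simp at hk
  | cons p ps ih =>
    cases pt with
    | nil => simp at h
    | cons b bs =>
      cases k with
      | zero => rw [nextRowAux_cons]; simp
      | succ k =>
        have h' : bs.length = ps.length := by simpa using h
        have hk' : k < ps.length := by simpa using hk
        rw [nextRowAux_cons]
        simpa using ih bs b (pvVal c p a left b) k h' hk'

-- the inner j-loop of A computes exactly the nextRow of its prev row (invariant form)
theorem pvAInner_inv (text pattern : String) (start i a c0 : Int) (pt curr : List Int) (c : Char)
    (hpt : pt.length = pattern.toList.length)
    (hcur : curr.length = pattern.toList.length + 1)
    (hc : PySem.Str.pyGet? text (start + i - 1) = some c) :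
    ∀ t : Nat, t ≤ pattern.toList.length →
      (PySem.List.pyRange 1 ((t : Int) + 1) 1).foldl (pvAInner text pattern start i (a :: pt))
          (c0, PySem.List.pySetD curr 0 i)
        = (c0 + (t : Int), (i :: nextRowAux pattern.toList pt a i c).take (t + 1)
            ++ (PySem.List.pySetD curr 0 i).drop (t + 1)) := by
  intro t
  induction t with
  | zero =>
    intro _
    rw [PySem.List.pyRange_one_eq_nil (by omega)]
    cases curr with
    | nil => simp at hcur
    | cons x rest =>
      simp [PySem.List.pySetD_of_nonneg]
  | succ t ih =>
    intro ht
    have ht' : t ≤ pattern.toList.length := by omega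
    have htlt : t < pattern.toList.length := by omega
    have hcast : ((t + 1 : Nat) : Int) + 1 = ((t : Int) + 1) + 1 := by push_cast; ring
    rw [hcast, PySem.List.pyRange_one_succ_right (by omega), List.foldl_append, ih ht']
    set pl := pattern.toList with hpl
    set aux := nextRowAux pl pt a i c with haux
    have hauxlen : aux.length = pl.length := nextRowAux_length pl pt a i c hpt
    have hcur0 : (PySem.List.pySetD curr 0 i).length = pl.length + 1 := by
      simpa [PySem.List.length_pySetD] using hcur
    set curr0 := PySem.List.pySetD curr 0 i with hcurr0
    set L := (i :: aux).take (t + 1) ++ curr0.drop (t + 1) with hL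
    have hTlen : ((i :: aux).take (t + 1)).length = t + 1 := by
      rw [List.length_take]
      simp [hauxlen]
      omega
    have hLlen : L.length = pl.length + 1 := by
      rw [hL, List.length_append, hTlen, List.length_drop, hcur0]
      omega
    have hj1 : ((t : Int) + 1) - 1 = (t : Int) := by ring
    have hpat : PySem.Str.pyGet? pattern ((t : Int)) = some (pl.getD t ' ') :=
      str_pyGet_natCast pattern t htlt
    have hread1 : PySem.List.pyGetD (a :: pt) ((t : Int) + 1) 0 = pt.getD t 0 := by
      have hcast1 : ((t : Int) + 1) = ((t + 1 : Nat) : Int) := by push_cast; ring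
      rw [hcast1, PySem.List.pyGetD_natCast]; simp
    have hread2 : PySem.List.pyGetD L ((t : Int)) 0 = (i :: aux).getD t 0 := by
      rw [PySem.List.pyGetD_natCast, hL]
      rw [List.getD_append _ _ _ _ (by omega), List.getD_eq_getElem?_getD, List.getD_eq_getElem?_getD]
      congr 1
      cases t with
      | zero => simp
      | succ u => simp
    have hread3 : PySem.List.pyGetD (a :: pt) ((t : Int)) 0 = (a :: pt).getD t 0 := by
      rw [PySem.List.pyGetD_natCast]
    have hv : min (min (PySem.List.pyGetD (a :: pt) ((t : Int) + 1) 0 + 1) (PySem.List.pyGetD L (((t : Int) + 1) - 1) 0 + 1))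
        (PySem.List.pyGetD (a :: pt) (((t : Int) + 1) - 1) 0 +
          (if PySem.Str.pyGet? text (start + i - 1) = PySem.Str.pyGet? pattern (((t : Int) + 1) - 1) then 0 else 1))
        = aux.getD t 0 := by
      rw [hj1, hread1, hread2, hread3, hc, hpat]
      rw [haux, nextRowAux_getD pl pt a i c t hpt htlt]
      rw [pvVal]
      simp
    have hwrite : PySem.List.pySetD L ((t : Int) + 1) (aux.getD t 0)
        = (i :: aux).take (t + 1 + 1) ++ curr0.drop (t + 1 + 1) := by
      have hcast1 : ((t : Int) + 1) = ((t + 1 : Nat) : Int) := by push_cast; ring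
      rw [hcast1, PySem.List.pySetD_natCast]
      rw [hL]
      rw [set_append_len _ _ _ _ hTlen.symm]
      have hdrop : curr0.drop (t + 1) ≠ [] := by
        intro hnil
        have hlen := congrArg List.length hnil
        rw [List.length_drop, hcur0] at hlen
        simp at hlen
        omega
      cases hD : curr0.drop (t + 1) with
      | nil => exact absurd hD hdrop
      | cons d ds =>
        have htail : ds = curr0.drop (t + 1 + 1) := by
          have h2 : (curr0.drop (t + 1)).tail = curr0.drop (t + 1 + 1) := List.tail_drop
          rw [hD] at h2
          simp only [List.tail_cons] at h2
          exact h2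
        have htake : (i :: aux).take (t + 1 + 1) = (i :: aux).take (t + 1) ++ [(i :: aux).getD (t + 1) 0] := by
          rw [List.take_add_one]
          congr 1
          have hlt : t + 1 < (i :: aux).length := by simp [hauxlen]; omega
          rw [List.getElem?_eq_getElem hlt]
          simp [List.getD_eq_getElem?_getD, List.getElem?_eq_getElem hlt]
        rw [htake, htail]
        simp
    simp only [List.foldl_cons, List.foldl_nil, pvAInner]
    rw [hv, hwrite]
    refine Prod.ext ?_ rfl
    push_cast
    ring

theorem pvRow_length (text pattern : String) (start : Int) (t : Nat) :
    (pvRow text pattern start t).length = pattern.toList.length + 1 := by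
  induction t with
  | zero => simp [pvRow, PySem.List.length_pyRange_one]
  | succ t ih =>
    cases h : pvRow text pattern start t with
    | nil => rw [h] at ih; simp at ih
    | cons a pt =>
      rw [h] at ih
      have hpt : pt.length = pattern.toList.length := by simpa using ih
      simp [pvRow, h, nextRow, nextRowAux_length _ _ _ _ _ hpt]

theorem pvRow_head (text pattern : String) (start : Int) (t : Nat) :
    (pvRow text pattern start t).getD 0 0 = (t : Int) := by
  induction t with
  | zero =>
    rw [pvRow, PySem.List.pyRange_one_cons (by positivity)]
    simp
  | succ t ih =>
    cases h : pvRow text pattern start t with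
    | nil =>
      have := pvRow_length text pattern start t
      rw [h] at this; simp at this
    | cons a pt =>
      rw [h] at ih
      simp only [List.getD_cons_zero] at ih
      rw [pvRow, h, nextRow]
      simp only [List.getD_cons_zero]
      rw [ih]
      push_cast
      ring

-- the i-loop of A: comparisons grow by m each pass, prev is the normal-form row, curr stays well-sized
theorem pvAMid_inv (text pattern : String) (start c0 : Int)
    (hs : 0 ≤ start) (hn : start + (pattern.toList.length : Int) ≤ (text.toList.length : Int)) :
    ∀ t : Nat, t ≤ pattern.toList.length → ∀ curr : List Int, curr.length = pattern.toList.length + 1 →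
      ∃ cur' : List Int, cur'.length = pattern.toList.length + 1 ∧
      (PySem.List.pyRange 1 ((t : Int) + 1) 1).foldl (pvAMid text pattern start)
          (c0, pvRow text pattern start 0, curr)
        = (c0 + (t : Int) * (pattern.toList.length : Int), pvRow text pattern start t, cur') := by
  intro t
  induction t with
  | zero =>
    intro _ curr hcurr
    refine ⟨curr, hcurr, ?_⟩
    rw [PySem.List.pyRange_one_eq_nil (by omega)]
    simp
  | succ t ih =>
    intro ht curr hcurr
    have ht' : t ≤ pattern.toList.length := by omega
    obtain ⟨cur', hcur'len, hfold⟩ := ih ht' curr hcurr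
    have hcast : ((t + 1 : Nat) : Int) + 1 = ((t : Int) + 1) + 1 := by push_cast; ring
    rw [hcast, PySem.List.pyRange_one_succ_right (by omega), List.foldl_append, hfold]
    obtain ⟨s0, hs0⟩ : ∃ s0 : Nat, start = (s0 : Int) := ⟨start.toNat, (Int.toNat_of_nonneg hs).symm⟩
    have hidx : s0 + t < text.toList.length := by omega
    have hc : PySem.Str.pyGet? text (start + ((t : Int) + 1) - 1) = some (text.toList.getD (s0 + t) ' ') := by
      have harith : start + ((t : Int) + 1) - 1 = ((s0 + t : Nat) : Int) := by rw [hs0]; push_cast; ring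
      rw [harith]
      exact str_pyGet_natCast text (s0 + t) hidx
    cases hrow : pvRow text pattern start t with
    | nil =>
      have := pvRow_length text pattern start t
      rw [hrow] at this; simp at this
    | cons a pt =>
      have hpt : pt.length = pattern.toList.length := by
        have := pvRow_length text pattern start t
        rw [hrow] at this; simpa using this
      have ha : a = (t : Int) := by
        have := pvRow_head text pattern start t
        rw [hrow] at this; simpa using this
      refine ⟨a :: pt, by simpa using hpt, ?_⟩
      simp only [List.foldl_cons, List.foldl_nil, pvAMid, PySem.Str.len_eq]
      rw [pvAInner_inv text pattern start ((t : Int) + 1) a (c0 + (t : Int) * (pattern.toList.length : Int)) pt cur' (text.toList.getD (s0 + t) ' ') hpt (by simpa using hcur'len) hc (pattern.toList.length) (le_refl _)]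
      refine Prod.ext (by push_cast; ring) (Prod.ext ?_ rfl)
      have hauxlen : (nextRowAux pattern.toList pt a ((t : Int) + 1) (text.toList.getD (s0 + t) ' ')).length = pattern.toList.length := nextRowAux_length _ _ _ _ _ hpt
      rw [List.take_of_length_le (by rw [List.length_cons, hauxlen]), List.drop_eq_nil_of_le (by rw [PySem.List.length_pySetD, hcur'len])]
      have hc' : PySem.Str.pyGet? text (start + (t : Int)) = some (text.toList.getD (s0 + t) ' ') := by
        have harith2 : start + (t : Int) = start + ((t : Int) + 1) - 1 := by ring
        rw [harith2]; exact hc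
      show _ = pvRow text pattern start (t + 1)
      rw [pvRow, hrow, hc', nextRow, ha]
      simp

-- ---- the normal-form row matches the recursive spec ----
theorem pvRow_getD_eq_pvD (text pattern : String) (start : Int)
    (hs : 0 ≤ start) (hn : start + (pattern.toList.length : Int) ≤ (text.toList.length : Int)) :
    ∀ t, t ≤ pattern.toList.length → ∀ j, j ≤ pattern.toList.length →
      (pvRow text pattern start t).getD j 0 = pvD text pattern start t j := by
  intro t
  induction t with
  | zero =>
    intro _ j hj
    rw [pvRow]
    have hlen : (PySem.List.pyRange 0 ((pattern.toList.length : Int) + 1) 1).length = pattern.toList.length + 1 := by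
      rw [PySem.List.length_pyRange_one]; omega
    rw [List.getD_eq_getElem?_getD, List.getElem?_eq_getElem (by omega), PySem.List.getElem_pyRange_one]
    cases j <;> simp [pvD]
  | succ t ih =>
    intro ht j hj
    have ht' : t ≤ pattern.toList.length := by omega
    obtain ⟨s0, hs0⟩ : ∃ s0 : Nat, start = (s0 : Int) := ⟨start.toNat, (Int.toNat_of_nonneg hs).symm⟩
    have hidx : s0 + t < text.toList.length := by omega
    have hc : PySem.Str.pyGet? text (start + (t : Int)) = some (text.toList.getD (s0 + t) ' ') := by
      have harith : start + (t : Int) = ((s0 + t : Nat) : Int) := by rw [hs0]; push_cast; ring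
      rw [harith]
      exact str_pyGet_natCast text (s0 + t) hidx
    set c0 := text.toList.getD (s0 + t) ' ' with hc0
    cases hrow : pvRow text pattern start t with
    | nil =>
      have := pvRow_length text pattern start t
      rw [hrow] at this; simp at this
    | cons a pt =>
      have hpt : pt.length = pattern.toList.length := by
        have := pvRow_length text pattern start t
        rw [hrow] at this; simpa using this
      have ha : a = (t : Int) := by
        have := pvRow_head text pattern start t
        rw [hrow] at this; simpa using this
      rw [pvRow, hrow, hc, nextRow]
      simp only [Option.getD_some]
      suffices h : ∀ j, j ≤ pattern.toList.length →
          ((a + 1) :: nextRowAux pattern.toList pt a (a + 1) c0).getD j 0 = pvD text pattern start (t + 1) j by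
        exact h j hj
      intro j
      induction j with
      | zero =>
        intro _
        simp [pvD, ha]
      | succ j ihj =>
        intro hj1
        have hjlt : j < pattern.toList.length := by omega
        rw [List.getD_cons_succ, nextRowAux_getD pattern.toList pt a (a + 1) c0 j hpt hjlt]
        have h1 : (a :: pt).getD j 0 = pvD text pattern start t j := by
          rw [← hrow]; exact ih ht' j (by omega)
        have h2 : pt.getD j 0 = pvD text pattern start t (j + 1) := by
          have := ih ht' (j + 1) (by omega)
          rw [hrow, List.getD_cons_succ] at this
          exact this
        have h3 : ((a + 1) :: nextRowAux pattern.toList pt a (a + 1) c0).getD j 0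
            = pvD text pattern start (t + 1) j := ihj (by omega)
        have hpat : PySem.Str.pyGet? pattern ((j : Int)) = some (pattern.toList.getD j ' ') :=
          str_pyGet_natCast pattern j hjlt
        rw [pvVal, h1, h2, h3]
        show _ = pvD text pattern start (t + 1) (j + 1)
        rw [pvD, hc, hpat]
        simp only [Option.some.injEq]

-- one window of A equals the spec decision and adds m*m comparisons
theorem pvAOuter_eq (text pattern : String) (max_distance : Int) (st : Int × List Int) (start : Int)
    (hs : 0 ≤ start) (hn : start + (pattern.toList.length : Int) ≤ (text.toList.length : Int)) :
    pvAOuter text pattern max_distance st start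
      = (st.1 + (pattern.toList.length : Int) * (pattern.toList.length : Int),
         if pvD text pattern start pattern.toList.length pattern.toList.length ≤ max_distance
         then st.2 ++ [start] else st.2) := by
  have hcurlen : (PySem.List.pyRepeat [(0 : Int)] ((pattern.toList.length : Int) + 1)).length
      = pattern.toList.length + 1 := by
    rw [PySem.List.pyRepeat_singleton, List.length_replicate]
    omega
  obtain ⟨cur', hlen, hfold⟩ := pvAMid_inv text pattern start st.1 hs hn
    (pattern.toList.length) (le_refl _) _ hcurlen
  rw [show pvRow text pattern start 0 = PySem.List.pyRange 0 ((pattern.toList.length : Int) + 1) 1 from rfl] at hfold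
  simp only [pvAOuter, PySem.Str.len_eq]
  simp only [hfold]
  rw [PySem.List.pyGetD_natCast,
    pvRow_getD_eq_pvD text pattern start hs hn (pattern.toList.length) (le_refl _) (pattern.toList.length) (le_refl _)]


-- ---- B-side: the wavefront dict satisfies the spec invariant ----

-- cells proved so far: all full anti-diagonals below s, plus diagonal s strictly left of column bound b
def pvBInvP (text pattern : String) (start : Int) (m : Nat) (c : PySem.Dict (Int × Int) Int) (s : Nat) (b : Int) : Prop :=
  ∀ i j : Nat, 1 ≤ i → i ≤ m → 1 ≤ j → j ≤ m → (i + j < s ∨ (i + j = s ∧ (i : Int) < b)) →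
    PySem.Dict.get? c ((i : Int), (j : Int)) = some (pvD text pattern start i j)

-- B's `get` reads the spec value for any already-settled cell (borders are computed on the fly)
theorem pvBGet_eq (text pattern : String) (start : Int) (m : Nat) (c : PySem.Dict (Int × Int) Int)
    (s : Nat) (b : Int) (h : pvBInvP text pattern start m c s b)
    (x y : Nat) (hx : x ≤ m) (hy : y ≤ m) (hxy : x + y < s) :
    pvBGet c (x : Int) (y : Int) = pvD text pattern start x y := by
  unfold pvBGet
  by_cases hx0 : x = 0
  · subst hx0
    simp only [Int.natCast_zero, ite_true]
    cases y <;> simp [pvD]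
  · rw [if_neg (by exact_mod_cast hx0)]
    by_cases hy0 : y = 0
    · subst hy0
      simp only [Int.natCast_zero, ite_true]
      obtain ⟨x', rfl⟩ : ∃ x', x = x' + 1 := ⟨x - 1, by omega⟩
      simp [pvD]
    · rw [if_neg (by exact_mod_cast hy0)]
      rw [h x y (by omega) hx (by omega) hy (Or.inl hxy)]
      rfl

-- one insertion on diagonal s extends the settled region by one column
theorem pvBInner_step (text pattern : String) (start : Int) (m : Nat)
    (c : PySem.Dict (Int × Int) Int) (s : Nat) (b : Int)
    (hs2 : 2 ≤ s) (hsm : s ≤ 2 * m)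
    (hb1 : max 1 ((s : Int) - (m : Int)) ≤ b) (hb2 : b ≤ min (m : Int) ((s : Int) - 1))
    (h : pvBInvP text pattern start m c s b) :
    pvBInvP text pattern start m (pvBInner text pattern start (s : Int) c b) s (b + 1) := by
  obtain ⟨bi, rfl⟩ : ∃ bi : Nat, b = (bi : Int) := ⟨b.toNat, by omega⟩
  have hbi1 : 1 ≤ bi := by omega
  have hbim : bi ≤ m := by omega
  have hjb1 : 1 ≤ s - bi := by omega
  have hjbm : s - bi ≤ m := by omega
  have hsbi : bi + 1 ≤ s := by omega
  intro i j hi1 him hj1 hjm hcase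
  unfold pvBInner
  by_cases hkey : (((i : Nat) : Int), ((j : Nat) : Int)) = (((bi : Nat) : Int), (s : Int) - (bi : Int))
  · rw [hkey, PySem.Dict.get?_insert_self]
    have h1 : ((i : Nat) : Int) = ((bi : Nat) : Int) := congrArg Prod.fst hkey
    have h2 : ((j : Nat) : Int) = (s : Int) - (bi : Int) := congrArg Prod.snd hkey
    have hib : i = bi := by exact_mod_cast h1
    have hjb : j = s - bi := by omega
    congr 1
    have e1 : (bi : Int) - 1 = ((bi - 1 : Nat) : Int) := by omega
    have e2 : (s : Int) - (bi : Int) = ((s - bi : Nat) : Int) := by omega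
    have e3 : (s : Int) - (bi : Int) - 1 = ((s - bi - 1 : Nat) : Int) := by omega
    rw [e3, e2, e1]
    rw [pvBGet_eq text pattern start m c s (bi : Int) h (bi - 1) (s - bi) (by omega) hjbm (by omega),
        pvBGet_eq text pattern start m c s (bi : Int) h bi (s - bi - 1) hbim (by omega) (by omega),
        pvBGet_eq text pattern start m c s (bi : Int) h (bi - 1) (s - bi - 1) (by omega) (by omega) (by omega)]
    subst hjb hib
    obtain ⟨i', rfl⟩ : ∃ i', i = i' + 1 := ⟨i - 1, by omega⟩
    obtain ⟨jb', hjb'⟩ : ∃ jb', s - (i' + 1) = jb' + 1 := ⟨s - (i' + 1) - 1, by omega⟩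
    have e4 : i' + 1 - 1 = i' := by omega
    rw [e4, hjb']
    have e5 : jb' + 1 - 1 = jb' := by omega
    rw [e5]
    have e6 : start + ((i' + 1 : Nat) : Int) - 1 = start + (i' : Int) := by push_cast; ring
    have e7 : (s : Int) - ((i' + 1 : Nat) : Int) - 1 = (jb' : Int) := by omega
    rw [e6]
    conv_rhs => rw [pvD]
  · rw [PySem.Dict.get?_insert_of_ne _ _ hkey]
    apply h i j hi1 him hj1 hjm
    rcases hcase with hlt | ⟨heq, hblt⟩
    · exact Or.inl hlt
    · by_cases hib : (i : Int) < (bi : Int)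
      · exact Or.inr ⟨heq, hib⟩
      · exfalso
        apply hkey
        have hib' : i = bi := by omega
        subst hib'
        have hj' : ((j : Nat) : Int) = (s : Int) - ((i : Nat) : Int) := by
          have h3 : ((i : Nat) : Int) + ((j : Nat) : Int) = (s : Int) := by exact_mod_cast heq
          omega
        rw [hj']

-- a full diagonal sweep settles diagonal s entirely
theorem pvBDiag_inv (text pattern : String) (start : Int) (m : Nat)
    (c : PySem.Dict (Int × Int) Int) (s : Nat)
    (hs2 : 2 ≤ s) (hsm : s ≤ 2 * m) (hm : 1 ≤ m)
    (h : pvBInvP text pattern start m c s (max 1 ((s : Int) - (m : Int)))) :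
    pvBInvP text pattern start m
      ((PySem.List.pyRange (max 1 ((s : Int) - (m : Int))) (min (m : Int) ((s : Int) - 1) + 1) 1).foldl
        (pvBInner text pattern start (s : Int)) c)
      s (min (m : Int) ((s : Int) - 1) + 1) := by
  set lo := max 1 ((s : Int) - (m : Int)) with hlo
  set hi := min (m : Int) ((s : Int) - 1) with hhi
  have hlohi : lo ≤ hi := by
    rw [hlo, hhi]
    omega
  have main : ∀ k : Nat, lo + (k : Int) ≤ hi + 1 →
      pvBInvP text pattern start m
        ((PySem.List.pyRange lo (lo + (k : Int)) 1).foldl (pvBInner text pattern start (s : Int)) c)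
        s (lo + (k : Int)) := by
    intro k
    induction k with
    | zero =>
      intro _
      rw [PySem.List.pyRange_one_eq_nil (by omega)]
      simpa using h
    | succ k ih =>
      intro hk
      have hcast : lo + ((k + 1 : Nat) : Int) = (lo + (k : Int)) + 1 := by push_cast; ring
      rw [hcast, PySem.List.pyRange_one_succ_right (by omega), List.foldl_append]
      simp only [List.foldl_cons, List.foldl_nil]
      exact pvBInner_step text pattern start m _ s (lo + (k : Int)) hs2 hsm
        (by omega) (by omega) (ih (by omega))
  have hk : lo + ((hi + 1 - lo).toNat : Int) = hi + 1 := by omega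
  have := main (hi + 1 - lo).toNat (by omega)
  rw [hk] at this
  exact this

-- every diagonal up to S is settled after the outer sweep
theorem pvBOuter_inv (text pattern : String) (start : Int)
    (hm : 1 ≤ pattern.toList.length) :
    ∀ S : Nat, S ≤ 2 * pattern.toList.length →
      ∀ i j : Nat, 1 ≤ i → i ≤ pattern.toList.length → 1 ≤ j → j ≤ pattern.toList.length →
        i + j ≤ S →
        PySem.Dict.get?
          ((PySem.List.pyRange 2 ((S : Int) + 1) 1).foldl
            (fun c s => (PySem.List.pyRange (max 1 (s - (pattern.toList.length : Int)))
                (min (pattern.toList.length : Int) (s - 1) + 1) 1).foldl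
              (pvBInner text pattern start s) c)
            PySem.Dict.empty)
          ((i : Int), (j : Int)) = some (pvD text pattern start i j) := by
  set m := pattern.toList.length with hmdef
  intro S
  induction S with
  | zero => intro _ i j hi1 _ hj1 _ hij; omega
  | succ S ih =>
    intro hS i j hi1 him hj1 hjm hij
    by_cases hS0 : S = 0
    · subst hS0; omega
    · have hpeel : PySem.List.pyRange 2 (((S + 1 : Nat) : Int) + 1) 1
          = PySem.List.pyRange 2 ((S : Int) + 1) 1 ++ [(S : Int) + 1] := by
        have hcast : ((S + 1 : Nat) : Int) + 1 = ((S : Int) + 1) + 1 := by push_cast; ring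
        rw [hcast, PySem.List.pyRange_one_succ_right (by omega)]
      rw [hpeel, List.foldl_append]
      simp only [List.foldl_cons, List.foldl_nil]
      have hprev : pvBInvP text pattern start m
          ((PySem.List.pyRange 2 ((S : Int) + 1) 1).foldl
            (fun c s => (PySem.List.pyRange (max 1 (s - (m : Int))) (min (m : Int) (s - 1) + 1) 1).foldl
              (pvBInner text pattern start s) c)
            PySem.Dict.empty)
          (S + 1) (max 1 (((S + 1 : Nat) : Int) - (m : Int))) := by
        intro i' j' hi'1 hi'm hj'1 hj'm hcase
        rcases hcase with hlt | ⟨heq, hblt⟩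
        · exact ih (by omega) i' j' hi'1 hi'm hj'1 hj'm (by omega)
        · exfalso
          have : (1 : Int) ≤ (i' : Int) := by exact_mod_cast hi'1
          have h2 : ((S + 1 : Nat) : Int) - (m : Int) ≤ (i' : Int) := by
            have : (j' : Int) ≤ (m : Int) := by exact_mod_cast hj'm
            have heq' : (i' : Int) + (j' : Int) = ((S + 1 : Nat) : Int) := by exact_mod_cast heq
            omega
          omega
      have hd := pvBDiag_inv text pattern start m _ (S + 1) (by omega) (by omega) hm hprev
      have hcast2 : (((S + 1 : Nat) : Int)) = (S : Int) + 1 := by push_cast; ring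
      rw [hcast2] at hd
      apply hd i j hi1 him hj1 hjm
      by_cases hlt : i + j < S + 1
      · exact Or.inl hlt
      · refine Or.inr ⟨by omega, ?_⟩
        have : (j : Int) ≥ 1 := by exact_mod_cast hj1
        have h3 : (i : Int) + (j : Int) = (S : Int) + 1 := by
          have : i + j = S + 1 := by omega
          exact_mod_cast this
        omega

-- ---- B-side: the wavefront dict matches the recursive spec ----
theorem pvBWindow_eq (text pattern : String) (max_distance : Int) (ms : List Int) (start : Int)
    (hm : 1 ≤ pattern.toList.length) :
    pvBWindow text pattern max_distance ms start
      = (if pvD text pattern start pattern.toList.length pattern.toList.length ≤ max_distance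
         then ms ++ [start] else ms) := by
  have h := pvBOuter_inv text pattern start hm (2 * pattern.toList.length) (le_refl _)
  have hcast : ((2 * pattern.toList.length : Nat) : Int) + 1 = 2 * (pattern.toList.length : Int) + 1 := by
    push_cast; ring
  rw [hcast] at h
  have hmm := h (pattern.toList.length) (pattern.toList.length) hm (le_refl _) hm (le_refl _) (by omega)
  simp only [pvBWindow, PySem.Str.len_eq, hmm, Option.getD_some]

-- the start loop
theorem startFold (text pattern : String) (max_distance : Int)
    (hm : 1 ≤ pattern.toList.length)
    (S : List Int) (hS : ∀ s ∈ S, 0 ≤ s ∧ s + (pattern.toList.length : Int) ≤ (text.toList.length : Int)) :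
    ∀ (c0 : Int) (ms : List Int),
      S.foldl (pvAOuter text pattern max_distance) (c0, ms)
        = (c0 + (S.length : Int) * ((pattern.toList.length : Int) * (pattern.toList.length : Int)),
           S.foldl (pvBWindow text pattern max_distance) ms) := by
  induction S with
  | nil => intro c0 ms; simp
  | cons x S ih =>
    intro c0 ms
    have hx := hS x (by simp)
    have hS' : ∀ s ∈ S, 0 ≤ s ∧ s + (pattern.toList.length : Int) ≤ (text.toList.length : Int) := by
      intro s hsm; exact hS s (by simp [hsm])
    rw [List.foldl_cons, List.foldl_cons,
      pvAOuter_eq text pattern max_distance (c0, ms) x hx.1 hx.2,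
      pvBWindow_eq text pattern max_distance ms x hm, ih hS']
    refine Prod.ext ?_ rfl
    rw [List.length_cons]
    push_cast
    ring

-- ===== VERDICT (by name: the statement is the Claim_ definition above) =====
theorem count_comparisons_levenshtein_spec : Claim_equal_count_comparisons_levenshtein := by
  intro text pattern max_distance _
  unfold Spec_count_comparisons_levenshtein
  unfold count_comparisons_levenshtein count_comparisons_levenshtein_alt
  simp only [PySem.Str.len_eq]
  by_cases hm : (pattern.toList.length : Int) = 0
  · rw [if_pos hm, if_pos hm]
  · rw [if_neg hm, if_neg hm]
    by_cases hn : (text.toList.length : Int) < (pattern.toList.length : Int)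
    · rw [if_pos hn, if_pos hn]
    · rw [if_neg hn, if_neg hn]
      have hS : ∀ s ∈ PySem.List.pyRange 0 ((text.toList.length : Int) - (pattern.toList.length : Int) + 1) 1,
          0 ≤ s ∧ s + (pattern.toList.length : Int) ≤ (text.toList.length : Int) := by
        intro s hsm
        rw [PySem.List.mem_pyRange_one] at hsm
        omega
      rw [startFold text pattern max_distance (by omega) _ hS 0 []]
      refine Prod.ext rfl ?_
      rw [PySem.List.length_pyRange_one]
      rw [Int.toNat_of_nonneg (by omega)]
      ring
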